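-- pv_equiv track=rewrite | github.com/pypi-data/pypi-mirror-359 | packages/smc-lammps/smc_lammps-0.1.2-py3-none-any.whl/smc_lammps/post_process/process_displacement.py | split_into_index_groups
-- ===== SOURCE A (Python) =====
-- from typing import Dict, List, Tuple
--
-- def is_sorted(lst) -> bool:
--     return all(lst[i] <= lst[i + 1] for i in range(len(lst) - 1))
--
-- def split_into_index_groups(indices) -> List[List[int]]:
--     """splits a (sorted) list of integers into groups of adjacent integers"""
--     indices = list(indices)
--     if not indices:
--         return indices
--
--     if not is_sorted(indices):
--         raise ValueError("indices must be sorted")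
--
--     groups = [[indices[0]]]
--     for index in indices[1:]:
--         if groups[-1][-1] == index - 1:
--             groups[-1].append(index)
--         else:
--             groups.append([index])
--
--     return groups
-- ===== SOURCE B (Python) =====
-- def split_into_index_groups(indices):
--     """splits a (sorted) list of integers into groups of adjacent integers"""
--     indices = list(indices)
--     if not indices:
--         return indices
--
--     if any(indices[i] > indices[i + 1] for i in range(len(indices) - 1)):
--         raise ValueError("indices must be sorted")
--
--     # build the groups back-to-front: walk the list in reverse, growing the
--     # current (descending) run, and flush each finished run onto `out`
--     out = []
--     cur = []
--     for x in reversed(indices):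
--         if cur and cur[-1] == x + 1:
--             cur.append(x)
--         else:
--             if cur:
--                 cur.reverse()
--                 out.append(cur)
--             cur = [x]
--     cur.reverse()
--     out.append(cur)
--     out.reverse()
--     return out
-- ===== Notes on version B (the rewrite author's own statement) =====
-- stated objective: alternative
-- what changed: B builds the groups back-to-front: it walks the list in reverse collecting each descending run in a separate accumulator and flushing finished runs, instead of A's forward loop that mutates the last group of the growing result.
import Mathlib
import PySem

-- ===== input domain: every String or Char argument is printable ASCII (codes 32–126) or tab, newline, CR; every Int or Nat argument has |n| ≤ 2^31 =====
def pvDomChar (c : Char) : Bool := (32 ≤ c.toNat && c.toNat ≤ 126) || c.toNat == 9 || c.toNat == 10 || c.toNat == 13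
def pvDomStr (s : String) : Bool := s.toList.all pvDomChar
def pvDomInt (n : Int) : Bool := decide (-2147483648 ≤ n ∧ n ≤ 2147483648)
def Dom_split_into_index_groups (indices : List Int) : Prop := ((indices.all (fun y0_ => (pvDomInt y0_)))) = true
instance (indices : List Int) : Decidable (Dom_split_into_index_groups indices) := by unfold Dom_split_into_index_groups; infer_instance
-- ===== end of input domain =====

-- B builds the groups back-to-front (reverse walk, prepending to the first group) instead of
-- A's forward loop that mutates the last group; same cost, alternative decomposition.

-- ===== PORT A =====
-- is_sorted: all(lst[i] <= lst[i+1] for i in range(len(lst) - 1)); indices of the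
-- comprehension are always in range, so pyGetD with default 0 is exact here.
def pvIsSorted (lst : List Int) : Bool :=
  (PySem.List.pyRange 0 ((lst.length : Int) - 1) 1).all
    (fun i => decide (PySem.List.pyGetD lst i 0 ≤ PySem.List.pyGetD lst (i + 1) 0))

-- the loop body: groups[-1][-1] == index - 1 → append to last group, else open a new group
def pvStepA (groups : List (List Int)) (index : Int) : List (List Int) :=
  if groups.getLast!.getLast! = index - 1 then
    groups.dropLast ++ [groups.getLast! ++ [index]]
  else
    groups ++ [[index]]

-- on unsorted input Python raises ValueError; those inputs are excluded by Pre_ and the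
-- port returns [] there
def split_into_index_groups (indices : List Int) : List (List Int) :=
  match indices with
  | [] => []
  | x0 :: rest =>
    if pvIsSorted (x0 :: rest) then
      rest.foldl pvStepA [[x0]]
    else []

-- ===== PORT B =====
-- the loop body of B: cur and cur[-1] == x + 1 → grow the current (descending) run,
-- else flush the finished run (reversed back to ascending) onto out and start a new one
def pvStepB (st : List (List Int) × List Int) (x : Int) : List (List Int) × List Int :=
  match st with
  | (out, cur) =>
    if cur ≠ [] ∧ cur.getLast! = x + 1 then (out, cur ++ [x])
    else ((if cur ≠ [] then out ++ [cur.reverse] else out), [x])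

def split_into_index_groups_alt (indices : List Int) : List (List Int) :=
  match indices with
  | [] => []
  | _ :: _ =>
    if (PySem.List.pyRange 0 ((indices.length : Int) - 1) 1).any
        (fun i => decide (PySem.List.pyGetD indices (i + 1) 0 < PySem.List.pyGetD indices i 0)) then
      []  -- ValueError in Python; excluded by Pre_
    else
      let st := indices.reverse.foldl pvStepB ([], [])
      (st.1 ++ [st.2.reverse]).reverse

-- ===== PRECONDITION & SPEC =====
-- Pre_ excludes exactly the unsorted lists, on which A (and B) raise ValueError.
def Pre_split_into_index_groups (indices : List Int) : Prop := List.IsChain (· ≤ ·) indices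
instance (indices : List Int) : Decidable (Pre_split_into_index_groups indices) := by
  unfold Pre_split_into_index_groups; infer_instance

def pvWitness_split_into_index_groups : List Int := [1, 2, 4, 4, 5, 7]

def Spec_split_into_index_groups (indices : List Int) (out : List (List Int)) : Prop := out = split_into_index_groups_alt indices
instance (indices : List Int) (out : List (List Int)) : Decidable (Spec_split_into_index_groups indices out) := by unfold Spec_split_into_index_groups; infer_instance

-- ===== CLAIM (what is proved, stated in full; the proofs are below) =====
def Claim_equal_split_into_index_groups : Prop := ∀ (indices : List Int), Dom_split_into_index_groups indices → Pre_split_into_index_groups indices → Spec_split_into_index_groups indices (split_into_index_groups indices)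

-- ===== LEMMAS AND PROOFS =====

-- proof helper: prepend one value to a list of consecutive runs (a right-fold step)
def pvRun (groups : List (List Int)) (x : Int) : List (List Int) :=
  match groups with
  | (y :: h) :: gs => if y = x + 1 then ([x] ++ y :: h) :: gs else [[x]] ++ (y :: h) :: gs
  | _ => [[x]] ++ groups

-- reading B's accumulator pair as the list of runs it denotes
def pvDecode (st : List (List Int) × List Int) : List (List Int) :=
  if st.2 = [] then [] else st.2.reverse :: st.1.reverse

theorem pvRev (cur : List Int) (h : cur ≠ []) :
    cur.reverse = cur.getLast! :: cur.dropLast.reverse := by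
  conv_lhs => rw [← List.dropLast_append_getLast h]
  rw [List.reverse_append]
  simp [List.getLast!_eq_getLast?_getD, List.getLast?_eq_some_getLast h]

theorem pvSnd_ne (ys : List Int) : ∀ (st : List (List Int) × List Int),
    st.2 ≠ [] ∨ ys ≠ [] → (ys.foldl pvStepB st).2 ≠ [] := by
  induction ys with
  | nil => intro st h; exact h.resolve_right (fun hh => hh rfl)
  | cons x ys ih =>
    intro st _
    rw [List.foldl_cons]
    refine ih _ (Or.inl ?_)
    obtain ⟨out, cur⟩ := st
    simp only [pvStepB]
    split <;> simp

theorem pvStepCorr (out : List (List Int)) (cur : List Int) (x : Int)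
    (hside : cur = [] → out = []) :
    pvDecode (pvStepB (out, cur) x) = pvRun (pvDecode (out, cur)) x := by
  by_cases hcur : cur = []
  · have hout := hside hcur
    subst hcur; subst hout
    simp [pvStepB, pvDecode, pvRun]
  · have e := pvRev cur hcur
    have hgd : cur.getLast?.getD 0 = cur.getLast! := (List.getLast!_eq_getLast?_getD).symm
    by_cases hc : cur.getLast! = x + 1
    · have e1 : pvStepB (out, cur) x = (out, cur ++ [x]) := by
        simp only [pvStepB]; rw [if_pos (And.intro hcur hc)]
      have e2 : pvDecode (out, cur ++ [x]) = (cur ++ [x]).reverse :: out.reverse := by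
        simp [pvDecode]
      have e3 : pvDecode (out, cur) = cur.reverse :: out.reverse := by
        simp [pvDecode, hcur]
      have e4 : pvRun ((cur.getLast! :: cur.dropLast.reverse) :: out.reverse) x =
          ([x] ++ cur.getLast! :: cur.dropLast.reverse) :: out.reverse := by
        simp only [pvRun]; rw [if_pos hc]
      rw [e1, e2, e3, e, e4, ← e]
      simp
    · have e1 : pvStepB (out, cur) x = (out ++ [cur.reverse], [x]) := by
        simp only [pvStepB]; rw [if_neg (fun hh => hc hh.2), if_pos hcur]
      have e2 : pvDecode (out ++ [cur.reverse], [x]) = [x] :: cur.reverse :: out.reverse := by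
        simp [pvDecode]
      have e3 : pvDecode (out, cur) = cur.reverse :: out.reverse := by
        simp [pvDecode, hcur]
      have e4 : pvRun ((cur.getLast! :: cur.dropLast.reverse) :: out.reverse) x =
          [[x]] ++ (cur.getLast! :: cur.dropLast.reverse) :: out.reverse := by
        simp only [pvRun]; rw [if_neg hc]
      rw [e1, e2, e3, e, e4, ← e]
      simp

theorem pvCorr (ys : List Int) : ∀ (out : List (List Int)) (cur : List Int),
    (cur = [] → out = []) →
    pvDecode (ys.foldl pvStepB (out, cur)) = ys.foldl pvRun (pvDecode (out, cur)) := by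
  induction ys with
  | nil => intro out cur _; rfl
  | cons x ys ih =>
    intro out cur hside
    rw [List.foldl_cons, List.foldl_cons, ← pvStepCorr out cur x hside]
    obtain ⟨out', cur', hst, hne⟩ : ∃ out' cur', pvStepB (out, cur) x = (out', cur') ∧ cur' ≠ [] := by
      by_cases hc : cur ≠ [] ∧ cur.getLast! = x + 1
      · refine ⟨out, cur ++ [x], ?_, by simp⟩
        simp only [pvStepB]; rw [if_pos hc]
      · refine ⟨(if cur ≠ [] then out ++ [cur.reverse] else out), [x], ?_, by simp⟩
        simp only [pvStepB]; rw [if_neg hc]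
    rw [hst]
    exact ih _ _ (fun h => absurd h hne)

-- B's fold over the reversed list is the right fold with pvRun
theorem pvRunsB_eq (xs : List Int) :
    xs.reverse.foldl pvRun [] = xs.foldr (fun x gs => pvRun gs x) [] := by
  rw [← List.foldr_reverse, List.reverse_reverse]

-- the head group of B's result starts with the head of the input
theorem pvRunsB_head (x : Int) (xs : List Int) :
    ∃ h gs, (x :: xs).foldr (fun x gs => pvRun gs x) [] = (x :: h) :: gs := by
  induction xs generalizing x with
  | nil => exact ⟨[], [], rfl⟩
  | cons y ys ih =>
    obtain ⟨h, gs, hy⟩ := ih y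
    simp only [List.foldr_cons] at hy ⊢
    rw [hy]
    by_cases hc : y = x + 1 <;> simp [pvRun, hc]

-- how a finished group (with last element v) attaches in front of the remaining runs
def pvAtt (g : List Int) (v : Int) (R : List (List Int)) : List (List Int) :=
  match R with
  | (y :: h) :: gs => if v = y - 1 then (g ++ v :: y :: h) :: gs else (g ++ [v]) :: (y :: h) :: gs
  | _ => [g ++ [v]]

@[simp] theorem pvGetLast!_concat {α : Type} [Inhabited α] (G : List α) (g : α) :
    (G ++ [g]).getLast! = g := by simp

theorem pvStepA_hit (G : List (List Int)) (g : List Int) (v x : Int) (h : v = x - 1) :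
    pvStepA (G ++ [g ++ [v]]) x = G ++ [(g ++ [v]) ++ [x]] := by
  simp [pvStepA, h]

theorem pvStepA_miss (G : List (List Int)) (g : List Int) (v x : Int) (h : ¬ v = x - 1) :
    pvStepA (G ++ [g ++ [v]]) x = (G ++ [g ++ [v]]) ++ [([] : List Int) ++ [x]] := by
  simp [pvStepA, h]

-- the key invariant: A's forward fold, started after G with current group g ++ [v],
-- equals G followed by that group attached to B's runs of the rest
theorem pvMain (xs : List Int) : ∀ (G : List (List Int)) (g : List Int) (v : Int),
    xs.foldl pvStepA (G ++ [g ++ [v]]) =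
      G ++ pvAtt g v (xs.foldr (fun x gs => pvRun gs x) []) := by
  induction xs with
  | nil => intro G g v; simp [pvAtt]
  | cons x xs ih =>
    intro G g v
    have hshape : xs.foldr (fun x gs => pvRun gs x) [] = [] ∨
        ∃ y h gs, xs.foldr (fun x gs => pvRun gs x) [] = (y :: h) :: gs := by
      cases xs with
      | nil => exact Or.inl rfl
      | cons y ys =>
        obtain ⟨h, gs, hy⟩ := pvRunsB_head y ys
        exact Or.inr ⟨y, h, gs, hy⟩
    by_cases hv : v = x - 1
    · rw [List.foldl_cons, pvStepA_hit G g v x hv, ih G (g ++ [v]) x, List.foldr_cons]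
      congr 1
      subst hv
      rcases hshape with hR | ⟨y, h, gs, hR⟩ <;> rw [hR]
      · simp [pvAtt, pvRun]
      · by_cases hc : y = x + 1
        · subst hc
          have e1 : pvRun (((x + 1) :: h) :: gs) x = (x :: (x + 1) :: h) :: gs := by
            simp [pvRun]
          have e2 : pvAtt (g ++ [x - 1]) x (((x + 1) :: h) :: gs) =
              ((g ++ [x - 1]) ++ x :: (x + 1) :: h) :: gs := by
            simp only [pvAtt]; split_ifs <;> first | rfl | omega | (rename_i hss; exfalso; omega) | simp
          have e3 : pvAtt g (x - 1) ((x :: (x + 1) :: h) :: gs) =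
              (g ++ (x - 1) :: x :: (x + 1) :: h) :: gs := by
            simp only [pvAtt]; split_ifs <;> first | rfl | omega | (rename_i hss; exfalso; omega) | simp
          rw [e1, e2, e3]; simp
        · have e1 : pvRun ((y :: h) :: gs) x = [x] :: (y :: h) :: gs := by
            simp [pvRun, hc]
          have e2 : pvAtt (g ++ [x - 1]) x ((y :: h) :: gs) =
              ((g ++ [x - 1]) ++ [x]) :: (y :: h) :: gs := by
            simp only [pvAtt]; split_ifs <;> first | rfl | omega | (rename_i hss; exfalso; omega) | simp
          have e3 : pvAtt g (x - 1) ([x] :: (y :: h) :: gs) =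
              (g ++ (x - 1) :: x :: ([] : List Int)) :: (y :: h) :: gs := by
            simp only [pvAtt]; split_ifs <;> first | rfl | omega | (rename_i hss; exfalso; omega) | simp
          rw [e1, e2, e3]; simp
    · rw [List.foldl_cons, pvStepA_miss G g v x hv, ih (G ++ [g ++ [v]]) [] x,
        List.foldr_cons, List.append_assoc]
      congr 1
      rcases hshape with hR | ⟨y, h, gs, hR⟩ <;> rw [hR]
      · simp [pvAtt, pvRun, hv]
      · by_cases hc : y = x + 1
        · have e1 : pvRun ((y :: h) :: gs) x = (x :: y :: h) :: gs := by
            simp [pvRun, hc]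
          have e2 : pvAtt ([] : List Int) x ((y :: h) :: gs) =
              (([] : List Int) ++ x :: y :: h) :: gs := by
            simp only [pvAtt]; split_ifs <;> first | rfl | omega | (rename_i hss; exfalso; omega) | simp
          have e3 : pvAtt g v ((x :: y :: h) :: gs) = (g ++ [v]) :: (x :: y :: h) :: gs := by
            simp only [pvAtt]; split_ifs <;> first | rfl | omega | (rename_i hss; exfalso; omega) | simp
          rw [e1, e2, e3]; simp
        · have e1 : pvRun ((y :: h) :: gs) x = [x] :: (y :: h) :: gs := by
            simp [pvRun, hc]
          have e2 : pvAtt ([] : List Int) x ((y :: h) :: gs) =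
              (([] : List Int) ++ [x]) :: (y :: h) :: gs := by
            simp only [pvAtt]; split_ifs <;> first | rfl | omega | (rename_i hss; exfalso; omega) | simp
          have e3 : pvAtt g v ([x] :: (y :: h) :: gs) =
              (g ++ [v]) :: [x] :: (y :: h) :: gs := by
            simp only [pvAtt]; split_ifs <;> first | rfl | omega | (rename_i hss; exfalso; omega) | simp
          rw [e1, e2, e3]; simp
-- under Pre_, A's sortedness guard passes
theorem pvGuardA (l : List Int) (hs : List.IsChain (· ≤ ·) l) : pvIsSorted l = true := by
  unfold pvIsSorted
  rw [List.all_eq_true]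
  intro i hi
  rw [PySem.List.mem_pyRange_one] at hi
  obtain ⟨hi0, hilt⟩ := hi
  rw [PySem.List.pyGetD_eq_getElem l (i := i) 0 hi0 (by omega),
      PySem.List.pyGetD_eq_getElem l (i := i + 1) 0 (by omega) (by omega)]
  have hidx : (i + 1).toNat = i.toNat + 1 := by omega
  simp only [hidx, decide_eq_true_eq]
  exact (List.isChain_iff_getElem.mp hs) i.toNat (by omega)

-- under Pre_, B's unsortedness guard finds nothing
theorem pvGuardB (l : List Int) (hs : List.IsChain (· ≤ ·) l) :
    (PySem.List.pyRange 0 ((l.length : Int) - 1) 1).any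
      (fun i => decide (PySem.List.pyGetD l (i + 1) 0 < PySem.List.pyGetD l i 0)) = false := by
  rw [List.any_eq_false]
  intro i hi
  rw [PySem.List.mem_pyRange_one] at hi
  obtain ⟨hi0, hilt⟩ := hi
  rw [PySem.List.pyGetD_eq_getElem l (i := i) 0 hi0 (by omega),
      PySem.List.pyGetD_eq_getElem l (i := i + 1) 0 (by omega) (by omega)]
  have hidx : (i + 1).toNat = i.toNat + 1 := by omega
  simp only [hidx, decide_eq_true_eq, not_lt]
  exact (List.isChain_iff_getElem.mp hs) i.toNat (by omega)

-- ===== VERDICT (by name: the statement is the Claim_ definition above) =====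
theorem split_into_index_groups_spec : Claim_equal_split_into_index_groups := by
  intro indices _ hpre
  unfold Spec_split_into_index_groups
  cases indices with
  | nil => rfl
  | cons x0 rest =>
    show (if pvIsSorted (x0 :: rest) = true then rest.foldl pvStepA [[x0]] else []) =
      (if ((PySem.List.pyRange 0 (((x0 :: rest).length : Int) - 1) 1).any
          (fun i => decide (PySem.List.pyGetD (x0 :: rest) (i + 1) 0 < PySem.List.pyGetD (x0 :: rest) i 0))) = true then
        []
      else
        ((((x0 :: rest).reverse.foldl pvStepB ([], [])).1 ++
          [(((x0 :: rest).reverse.foldl pvStepB ([], [])).2).reverse]).reverse))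
    rw [if_pos (pvGuardA _ hpre), pvGuardB _ hpre]
    simp only [Bool.false_eq_true, if_false]
    have hne := pvSnd_ne ((x0 :: rest).reverse) ([], ([] : List Int)) (Or.inr (by simp))
    have hdec : ((((x0 :: rest).reverse.foldl pvStepB ([], [])).1 ++
        [(((x0 :: rest).reverse.foldl pvStepB ([], [])).2).reverse]).reverse)
        = pvDecode ((x0 :: rest).reverse.foldl pvStepB ([], [])) := by
      unfold pvDecode
      rw [if_neg hne]
      simp
    have hcor := pvCorr ((x0 :: rest).reverse) [] [] (fun _ => rfl)
    have hz : pvDecode (([] : List (List Int)), ([] : List Int)) = [] := rfl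
    rw [hdec, hcor, hz, pvRunsB_eq, List.foldr_cons]
    have hmain := pvMain rest [] [] x0
    simp only [List.nil_append] at hmain
    rw [hmain]
    cases rest with
    | nil => simp [pvAtt, pvRun]
    | cons r rs =>
      obtain ⟨h, gs, hy⟩ := pvRunsB_head r rs
      rw [hy]
      by_cases hc : r = x0 + 1
      · have e1 : pvRun ((r :: h) :: gs) x0 = (x0 :: r :: h) :: gs := by
          simp [pvRun, hc]
        have e2 : pvAtt ([] : List Int) x0 ((r :: h) :: gs) =
            (([] : List Int) ++ x0 :: r :: h) :: gs := by
          simp only [pvAtt]; split_ifs <;> first | rfl | omega | (rename_i hss; exfalso; omega) | simp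
        rw [e1, e2]; simp
      · have e1 : pvRun ((r :: h) :: gs) x0 = [x0] :: (r :: h) :: gs := by
          simp [pvRun, hc]
        have e2 : pvAtt ([] : List Int) x0 ((r :: h) :: gs) =
            (([] : List Int) ++ [x0]) :: (r :: h) :: gs := by
          simp only [pvAtt]; split_ifs <;> first | rfl | omega | (rename_i hss; exfalso; omega) | simp
        rw [e1, e2]; simp
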